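-- pv_equiv track=rewrite | github.com/collinsakenga/codewars_solutions | 6 kyu/6 kyu_Address Book by State.py | by_state
-- ===== SOURCE A (Python) =====
-- locations={'AZ': 'Arizona',
-- 'CA': 'California',
-- 'ID': 'Idaho',
-- 'IN': 'Indiana',
-- 'MA': 'Massachusetts',
-- 'OK': 'Oklahoma',
-- 'PA': 'Pennsylvania',
-- 'VA': 'Virginia'}
--
-- def by_state(str):
--     dict={}
--     res=""
--     for i in str.split("\n"):
--         temp=i.replace(",","").split()
--         if not temp:
--             continue
--         if not dict.get(locations[temp[-1]], None):
--             dict[locations[temp[-1]]]=[" ".join(temp[:-1]+[locations[temp[-1]]])]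
--         else:
--             dict[locations[temp[-1]]].append(" ".join(temp[:-1]+[locations[temp[-1]]]))
--     for k,v in sorted(dict.items(), key=lambda x:x[0]):
--         res+=k+"\r\n..... "+"\r\n..... ".join(sorted(v))+"\r\n "
--     return res[:-3]
-- ===== SOURCE B (Python) =====
-- locations={'AZ': 'Arizona',
-- 'CA': 'California',
-- 'ID': 'Idaho',
-- 'IN': 'Indiana',
-- 'MA': 'Massachusetts',
-- 'OK': 'Oklahoma',
-- 'PA': 'Pennsylvania',
-- 'VA': 'Virginia'}
--
-- def by_state(str):
--     pairs = []
--     for line in str.split("\n"):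
--         t = line.replace(",", "").split()
--         if t:
--             full = locations[t[-1]]
--             pairs.append((full, " ".join(t[:-1] + [full])))
--     states = sorted({s for s, _ in pairs})
--     return "\r\n ".join(
--         s + "\r\n..... " + "\r\n..... ".join(sorted(e for p, e in pairs if p == s))
--         for s in states)
-- ===== Notes on version B (the rewrite author's own statement) =====
-- stated objective: simpler
-- what changed: B replaces A's mutable dict of growing lists plus sorted(dict.items()) plus trailing-separator [:-3] trim by one flat (state, entry) pair list, a sorted set of the distinct state names, a per-state filter, and a direct join of the blocks with the separator (no slicing).
import Mathlib
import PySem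

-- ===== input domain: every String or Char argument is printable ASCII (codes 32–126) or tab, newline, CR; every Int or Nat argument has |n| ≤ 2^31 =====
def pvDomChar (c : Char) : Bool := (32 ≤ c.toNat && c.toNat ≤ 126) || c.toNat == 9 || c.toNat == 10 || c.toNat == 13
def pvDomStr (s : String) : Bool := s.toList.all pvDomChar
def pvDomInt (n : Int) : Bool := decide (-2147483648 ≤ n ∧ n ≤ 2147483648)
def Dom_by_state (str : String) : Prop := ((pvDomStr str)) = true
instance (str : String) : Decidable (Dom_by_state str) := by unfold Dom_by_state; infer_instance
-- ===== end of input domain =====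

-- B groups the parsed (state, entry) pairs by sorting the distinct state names and filtering per
-- state, joining the blocks with the separator directly — no dict of growing lists and no
-- trailing-separator trim; objective: simpler. A mutates only locals, so return values are compared.

-- ===== PORT A =====
def locationsD : PySem.Dict String String :=
  PySem.Dict.ofList [("AZ","Arizona"),("CA","California"),("ID","Idaho"),("IN","Indiana"),
    ("MA","Massachusetts"),("OK","Oklahoma"),("PA","Pennsylvania"),("VA","Virginia")]

def by_state (str : String) : String :=
  let d := ((PySem.Str.split? str "\n").getD []).foldl
    (fun (d : PySem.Dict String (List String)) i =>
      let temp := PySem.Str.split₀ (PySem.Str.replace i "," "")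
      if temp.isEmpty then d  -- 'if not temp: continue'
      else
        match (PySem.List.pyGet? temp (-1)).bind locationsD.get? with
        | none => d  -- locations[temp[-1]] raises KeyError here; excluded by Pre_by_state
        | some full =>
          -- 'if not dict.get(locations[temp[-1]], None): … else: ….append(…)'
          if (d.getD full []).isEmpty then
            d.insert full [PySem.Str.join " " (PySem.List.slice temp none (some (-1)) ++ [full])]
          else
            d.insert full (d.getD full [] ++ [PySem.Str.join " " (PySem.List.slice temp none (some (-1)) ++ [full])]))
    PySem.Dict.empty
  let res := (PySem.List.sorted d.items (fun x => x.1)).foldl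
    (fun res kv => res ++ kv.1 ++ "\r\n..... "
      ++ PySem.Str.join "\r\n..... " (PySem.List.sorted kv.2 (fun x => x)) ++ "\r\n ") ""
  PySem.Str.slice res none (some (-3))

-- ===== PORT B =====
def by_state_alt (str : String) : String :=
  let pairs := ((PySem.Str.split? str "\n").getD []).foldl
    (fun (acc : List (String × String)) line =>
      let t := PySem.Str.split₀ (PySem.Str.replace line "," "")
      if t.isEmpty then acc
      else
        match (PySem.List.pyGet? t (-1)).bind locationsD.get? with
        | none => acc  -- locations[t[-1]] raises KeyError here; excluded by Pre_by_state
        | some full => acc ++ [(full, PySem.Str.join " " (PySem.List.slice t none (some (-1)) ++ [full]))]) []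
  let states := PySem.List.sorted (PySem.Set.ofList (pairs.map (fun p => p.1))) (fun s => s)
  PySem.Str.join "\r\n " (states.map (fun s =>
    s ++ "\r\n..... "
      ++ PySem.Str.join "\r\n..... " (PySem.List.sorted ((pairs.filter (fun p => p.1 == s)).map (fun p => p.2)) (fun e => e))))

-- ===== PRECONDITION & SPEC =====
-- Pre_ excludes exactly the inputs with a non-empty line whose last comma-stripped token is not one
-- of the eight known state abbreviations: there Python's locations[temp[-1]] raises KeyError.
def Pre_by_state (str : String) : Prop :=
  ∀ line ∈ (PySem.Str.split? str "\n").getD [],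
    (PySem.Str.split₀ (PySem.Str.replace line "," "")) = [] ∨
    ((PySem.Str.split₀ (PySem.Str.replace line "," "")).getLast?.getD "")
      ∈ ["AZ","CA","ID","IN","MA","OK","PA","VA"]
instance (str : String) : Decidable (Pre_by_state str) := by unfold Pre_by_state; infer_instance

def pvWitness_by_state : String := "John Daggett, MA\nAlice Ford, VA"

def Spec_by_state (str : String) (out : String) : Prop := out = by_state_alt str
instance (str : String) (out : String) : Decidable (Spec_by_state str out) := by unfold Spec_by_state; infer_instance

-- ===== CLAIM (what is proved, stated in full; the proofs are below) =====
def Claim_equal_by_state : Prop := ∀ (str : String), Dom_by_state str → Pre_by_state str → Spec_by_state str (by_state str)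

-- ===== LEMMAS AND PROOFS =====

-- the common per-line parse: (full state name, formatted entry), none when the line is skipped
-- (empty) or the state lookup fails (both ports skip it; Python raises there, outside Pre_).
def parseLine (line : String) : Option (String × String) :=
  let t := PySem.Str.split₀ (PySem.Str.replace line "," "")
  if t.isEmpty then none
  else ((PySem.List.pyGet? t (-1)).bind locationsD.get?).map
    (fun full => (full, PySem.Str.join " " (PySem.List.slice t none (some (-1)) ++ [full])))

theorem foldB_eq (lines : List String) (acc : List (String × String)) :
    lines.foldl
      (fun (acc : List (String × String)) line =>
        let t := PySem.Str.split₀ (PySem.Str.replace line "," "")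
        if t.isEmpty then acc
        else
          match (PySem.List.pyGet? t (-1)).bind locationsD.get? with
          | none => acc
          | some full => acc ++ [(full, PySem.Str.join " " (PySem.List.slice t none (some (-1)) ++ [full]))]) acc
    = acc ++ lines.filterMap parseLine := by
  induction lines generalizing acc with
  | nil => simp
  | cons l ls ih =>
    simp only [List.foldl_cons, List.filterMap_cons, ih, parseLine]
    by_cases h : (PySem.Str.split₀ (PySem.Str.replace l "," "")).isEmpty
    · simp only [if_pos h]
    · simp only [if_neg h]
      cases hm : (PySem.List.pyGet? (PySem.Str.split₀ (PySem.Str.replace l "," "")) (-1)).bind locationsD.get? with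
      | none => simp only [Option.map_none]
      | some full => simp only [Option.map_some]; simp [List.append_assoc]

theorem foldA_eq (lines : List String) (d : PySem.Dict String (List String)) :
    lines.foldl
      (fun (d : PySem.Dict String (List String)) i =>
        let temp := PySem.Str.split₀ (PySem.Str.replace i "," "")
        if temp.isEmpty then d
        else
          match (PySem.List.pyGet? temp (-1)).bind locationsD.get? with
          | none => d
          | some full =>
            if (d.getD full []).isEmpty then
              d.insert full [PySem.Str.join " " (PySem.List.slice temp none (some (-1)) ++ [full])]
            else
              d.insert full (d.getD full [] ++ [PySem.Str.join " " (PySem.List.slice temp none (some (-1)) ++ [full])])) d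
    = (lines.filterMap parseLine).foldl (fun d p => d.modify p.1 [] (fun v => v ++ [p.2])) d := by
  induction lines generalizing d with
  | nil => simp
  | cons l ls ih =>
    simp only [List.foldl_cons, List.filterMap_cons, parseLine]
    by_cases h : (PySem.Str.split₀ (PySem.Str.replace l "," "")).isEmpty
    · simp only [if_pos h]
      exact ih d
    · simp only [if_neg h]
      cases hm : (PySem.List.pyGet? (PySem.Str.split₀ (PySem.Str.replace l "," "")) (-1)).bind locationsD.get? with
      | none =>
        simp only [Option.map_none]
        exact ih d
      | some full =>
        simp only [Option.map_some, List.foldl_cons]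
        rw [ih]
        congr 1
        by_cases he : (d.getD full []).isEmpty
        · rw [List.isEmpty_iff] at he
          simp [PySem.Dict.modify, he]
        · simp [PySem.Dict.modify, he]

theorem trim3 (sep : List Char) (hsep : sep.length = 3) (bs : List (List Char)) :
    ((bs.map (fun b => b ++ sep)).flatten).take (((bs.map (fun b => b ++ sep)).flatten).length - 3)
      = PySem.Chars.join sep bs := by
  induction bs with
  | nil => simp [PySem.Chars.join_nil]
  | cons b rest ih =>
    cases rest with
    | nil =>
      simp only [List.map_cons, List.map_nil, List.flatten_cons, List.flatten_nil,
        List.append_nil, PySem.Chars.join_singleton, List.length_append, hsep]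
      rw [List.take_append]
      simp
    | cons c cs =>
      simp only [List.map_cons, List.flatten_cons] at ih ⊢
      rw [PySem.Chars.join_cons_cons]
      have hlen : ((b ++ sep) ++ ((c ++ sep) ++ ((cs.map (fun b => b ++ sep))).flatten)).length - 3
          = (b ++ sep).length + (((c ++ sep) ++ ((cs.map (fun b => b ++ sep))).flatten).length - 3) := by
        simp only [List.length_append, hsep]
        omega
      rw [hlen, List.take_append, List.take_of_length_le (Nat.le_add_right _ _),
        Nat.add_sub_cancel_left, ih]

theorem resfold (L : List (String × List String)) (init : String) :
    (L.foldl (fun res kv => res ++ kv.1 ++ "\r\n..... "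
        ++ PySem.Str.join "\r\n..... " (PySem.List.sorted kv.2 (fun x => x)) ++ "\r\n ") init).toList
    = init.toList ++ (L.map (fun kv => kv.1.toList ++ "\r\n..... ".toList
        ++ (PySem.Str.join "\r\n..... " (PySem.List.sorted kv.2 (fun x => x))).toList ++ "\r\n ".toList)).flatten := by
  induction L generalizing init with
  | nil => simp
  | cons kv L ih =>
    simp only [List.foldl_cons, List.map_cons, List.flatten_cons, ih, String.toList_append]
    simp [List.append_assoc]

theorem pairwise_lt_sorted_nodup {α : Type} [LinearOrder α] (xs : List α) (h : xs.Nodup) :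
    (PySem.List.sorted xs (fun x => x)).Pairwise (fun a b => a < b) := by
  have hnd : (PySem.List.sorted xs (fun x => x)).Nodup :=
    (PySem.List.sorted_perm xs (fun x => x) false).symm.nodup h
  have hle := PySem.List.sorted_pairwise xs (fun x => x)
  exact (hle.and hnd).imp (fun hab => lt_of_le_of_ne hab.1 hab.2)

-- ===== VERDICT (by name: the statement is the Claim_ definition above) =====
theorem by_state_spec : Claim_equal_by_state := by
  intro str _ _
  unfold Spec_by_state by_state by_state_alt
  rw [foldA_eq, foldB_eq]
  simp only [List.nil_append]
  set P := ((PySem.Str.split? str "\n").getD []).filterMap parseLine with hP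
  set K : List String := PySem.Set.ofList (P.map (fun p => p.1)) with hK
  set d := P.foldl (fun d p => d.modify p.1 [] (fun v => v ++ [p.2])) PySem.Dict.empty with hd
  have hkeys : d.keys = K := by
    rw [hd, PySem.Dict.keys_foldl_modify_key P (fun p => p.1) [] (fun _ p v => v ++ [p.2])]
    rw [PySem.Dict.keys_empty, hK, PySem.Set.ofList_eq_foldl]
    rfl
  have hnodup : d.keys.Nodup := by
    rw [hkeys, hK]; exact PySem.Set.nodup_ofList _
  have hgetD : ∀ k, d.getD k [] = (P.filter (fun p => p.1 == k)).map (fun p => p.2) := by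
    intro k
    rw [hd, PySem.Dict.getD_foldl_modify_append, PySem.Dict.getD_empty]
    simp
  have hitems : d.items = K.map (fun k => (k, (P.filter (fun p => p.1 == k)).map (fun p => p.2))) := by
    rw [PySem.Dict.items_eq_map_keys d hnodup []]
    rw [hkeys]
    exact List.map_congr_left (fun k _ => by rw [hgetD])
  have hsorted : PySem.List.sorted d.items (fun x => x.1)
      = (PySem.List.sorted K (fun s => s)).map
          (fun k => (k, (P.filter (fun p => p.1 == k)).map (fun p => p.2))) := by
    apply PySem.List.sorted_eq_of_perm_of_pairwise_lt
    · rw [hitems]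
      exact (PySem.List.sorted_perm K (fun s => s) false).map _
    · rw [List.pairwise_map]
      exact pairwise_lt_sorted_nodup K (by rw [hK]; exact PySem.Set.nodup_ofList _)
  rw [hsorted]
  rw [← String.toList_inj]
  rw [PySem.Str.toList_slice, PySem.Chars.slice_eq_listSlice]
  rw [resfold]
  simp only [String.toList_empty, List.nil_append, List.map_map]
  rw [PySem.List.slice_to_neg_ofNat _ 3 (by omega)]
  rw [PySem.Str.toList_join]
  have := trim3 ("\r\n ".toList) (by decide)
    ((PySem.List.sorted K (fun s => s)).map (fun k =>
      k.toList ++ "\r\n..... ".toList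
        ++ (PySem.Str.join "\r\n..... " (PySem.List.sorted ((P.filter (fun p => p.1 == k)).map (fun p => p.2)) (fun e => e))).toList))
  rw [List.map_map] at this
  rw [List.map_map]
  simp only [Function.comp_def, String.toList_append] at this ⊢
  exact this
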